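-- pv_equiv track=rewrite | github.com/pypi-data/pypi-mirror-34 | packages/MultiPoint/MultiPoint-0.0.2-py3-none-any.whl/MultiPoint/rewrite.py | math_highlight
-- ===== SOURCE A (Python) =====
-- def math_highlight(inline):
--     n = inline.count('$')
--     if n < 2:
--         return inline
--     out = ''
--     mathmode=False
--     for c in inline:
--         if c == '$':
--             if mathmode:
--                 out=out+'`'
--                 mathmode=False
--             else:
--                 out=out+':math:`'
--                 mathmode=True
--         else:
--             out=out+c
--     return out
-- ===== SOURCE B (Python) =====
-- def math_highlight(inline):
--     if inline.count('$') < 2: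
--         return inline
--     parts = inline.split('$')
--     out = parts[0]
--     for i, part in enumerate(parts[1:]):
--         out += (':math:`' if i % 2 == 0 else '`') + part
--     return out
-- ===== Notes on version B (the rewrite author's own statement) =====
-- stated objective: idiomatic
-- what changed: B replaces A's character-by-character scan with a mathmode flag by splitting the string on the dollar delimiter and rejoining the pieces with the opening or closing math-markup token chosen by gap parity.
import Mathlib
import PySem

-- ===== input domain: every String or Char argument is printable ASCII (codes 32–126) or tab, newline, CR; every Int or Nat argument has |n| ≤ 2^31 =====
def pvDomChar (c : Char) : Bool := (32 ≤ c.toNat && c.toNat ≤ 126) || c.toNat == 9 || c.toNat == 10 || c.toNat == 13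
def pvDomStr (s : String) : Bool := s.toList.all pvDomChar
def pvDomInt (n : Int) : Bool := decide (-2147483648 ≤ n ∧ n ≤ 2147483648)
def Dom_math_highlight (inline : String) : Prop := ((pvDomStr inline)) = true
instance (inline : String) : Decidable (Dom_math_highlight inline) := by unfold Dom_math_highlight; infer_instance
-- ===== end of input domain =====

-- B rebuilds the string from inline.split('$') with alternating ':math:`'/'`' separators (idiomatic) instead of A's per-character mathmode scan.

-- ===== PORT A =====
-- A: count '$'; if < 2 return input; else scan chars, toggling mathmode at each '$'.
def math_highlight (inline : String) : String :=
  let n := PySem.Chars.count inline.toList ['$']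
  if n < 2 then inline
  else
    let st := inline.toList.foldl (fun (st : List Char × Bool) c =>
      if c = '$' then
        if st.2 then (st.1 ++ ['`'], false)
        else (st.1 ++ [':', 'm', 'a', 't', 'h', ':', '`'], true)
      else (st.1 ++ [c], st.2)) ([], false)
    String.ofList st.1

-- ===== PORT B =====
-- B: split on '$', then rejoin: parts[0], then before each later part ':math:`' (even gap) or '`' (odd gap).
def math_highlight_alt (inline : String) : String :=
  if PySem.Chars.count inline.toList ['$'] < 2 then inline
  else
    let parts := PySem.Chars.splitOn inline.toList ['$']
    let out := (PySem.List.enumerate parts.tail).foldl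
      (fun (acc : List Char) (ip : Int × List Char) =>
        acc ++ (if PySem.Int.mod ip.1 2 = 0 then [':', 'm', 'a', 't', 'h', ':', '`'] else ['`']) ++ ip.2)
      (parts.headD [])
    String.ofList out

-- ===== PRECONDITION & SPEC =====
def Spec_math_highlight (inline : String) (out : String) : Prop := out = math_highlight_alt inline
instance (inline : String) (out : String) : Decidable (Spec_math_highlight inline out) := by unfold Spec_math_highlight; infer_instance

-- ===== CLAIM (what is proved, stated in full; the proofs are below) =====
def Claim_equal_math_highlight : Prop := ∀ (inline : String), Dom_math_highlight inline → Spec_math_highlight inline (math_highlight inline)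

-- ===== LEMMAS AND PROOFS =====

-- A's loop body, named (definitionally equal to the lambda in the port).
def stepA (st : List Char × Bool) (c : Char) : List Char × Bool :=
  if c = '$' then
    if st.2 then (st.1 ++ ['`'], false)
    else (st.1 ++ [':', 'm', 'a', 't', 'h', ':', '`'], true)
  else (st.1 ++ [c], st.2)

-- A simple structural split on '$', used as the common middle ground.
def mysplit (cs : List Char) : List (List Char) :=
  match cs with
  | [] => [[]]
  | c :: rest =>
    if c = '$' then [] :: mysplit rest
    else match mysplit rest with
      | [] => [[c]]        -- unreachable: mysplit is never empty
      | h :: t => (c :: h) :: t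

theorem mysplit_ne_nil (cs : List Char) : mysplit cs ≠ [] := by
  cases cs with
  | nil => simp [mysplit]
  | cons c rest =>
    simp only [mysplit]
    split <;> simp_all
    split <;> simp

-- splitOn's fuel-based worker agrees with mysplit (single-character separator).
theorem go_eq (fuel : Nat) (l cur : List Char) (acc : List (List Char))
    (h : l.length ≤ fuel) :
    PySem.Chars.splitOn.go ['$'] fuel l cur acc =
      acc.reverse ++ (match mysplit l with
        | [] => [cur.reverse]
        | h :: t => (cur.reverse ++ h) :: t) := by
  induction fuel generalizing l cur acc with
  | zero =>
    have : l = [] := by cases l <;> simp_all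
    subst this
    simp [PySem.Chars.splitOn.go, mysplit]
  | succ n ih =>
    cases l with
    | nil => simp [PySem.Chars.splitOn.go, mysplit]
    | cons c rest =>
      simp only [PySem.Chars.splitOn.go]
      by_cases hc : c = '$'
      · subst hc
        rw [if_pos (by simp [List.isPrefixOf])]
        simp only [List.length_cons, List.length_nil, List.drop_succ_cons, List.drop_zero]
        rw [ih rest [] _ (by simp only [List.length_cons] at h; omega)]
        cases hm : mysplit rest with
        | nil => exact absurd hm (mysplit_ne_nil rest)
        | cons hh t => simp [mysplit, hm]
      · rw [if_neg (by simp [List.isPrefixOf]; exact fun h => hc h.symm)]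
        rw [ih rest (c :: cur) acc (by simp only [List.length_cons] at h; omega)]
        simp only [mysplit, if_neg hc]
        cases hm : mysplit rest with
        | nil => exact absurd hm (mysplit_ne_nil rest)
        | cons hh t => simp

theorem splitOn_eq_mysplit (cs : List Char) :
    PySem.Chars.splitOn cs ['$'] = mysplit cs := by
  unfold PySem.Chars.splitOn
  rw [go_eq (cs.length + 1) cs [] [] (by omega)]
  cases hm : mysplit cs with
  | nil => exact absurd hm (mysplit_ne_nil cs)
  | cons h t => simp

-- The alternating rendering of the tail pieces, parameterised by mathmode.
def renderTail (ps : List (List Char)) (m : Bool) : List Char :=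
  match ps with
  | [] => []
  | p :: rest => (if m then ['`'] else [':', 'm', 'a', 't', 'h', ':', '`']) ++ p ++ renderTail rest (!m)

-- A's loop, characterised: the accumulated output is out ++ (head of split) ++ alternating tail.
theorem foldA_eq (cs : List Char) (out : List Char) (m : Bool) :
    cs.foldl stepA (out, m) =
    (out ++ (mysplit cs).headD [] ++ renderTail (mysplit cs).tail m,
     m ^^ decide ((cs.count '$') % 2 = 1)) := by
  induction cs generalizing out m with
  | nil => simp [mysplit, renderTail]
  | cons c rest ih =>
    rw [List.foldl_cons]
    by_cases hc : c = '$'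
    · subst hc
      cases m with
      | false =>
        rw [show stepA (out, false) '$' = (out ++ [':', 'm', 'a', 't', 'h', ':', '`'], true) from rfl, ih]
        simp only [mysplit, Prod.mk.injEq]
        constructor
        · cases hm : mysplit rest with
          | nil => exact absurd hm (mysplit_ne_nil rest)
          | cons hh t => simp [renderTail]
        · by_cases hp : rest.count '$' % 2 = 1 <;>
            simp [hp] <;> omega
      | true =>
        rw [show stepA (out, true) '$' = (out ++ ['`'], false) from rfl, ih]
        simp only [mysplit, Prod.mk.injEq]
        constructor
        · cases hm : mysplit rest with
          | nil => exact absurd hm (mysplit_ne_nil rest)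
          | cons hh t => simp [renderTail]
        · by_cases hp : rest.count '$' % 2 = 1 <;>
            simp [hp] <;> omega
    · rw [show stepA (out, m) c = (out ++ [c], m) by simp [stepA, hc], ih]
      simp only [mysplit, if_neg hc, List.count_cons, beq_eq_false_iff_ne.mpr hc]
      cases hm : mysplit rest with
      | nil => exact absurd hm (mysplit_ne_nil rest)
      | cons hh t => simp

-- B's loop over the enumerated tail equals renderTail with mathmode = (i odd).
theorem foldB_eq (ps : List (List Char)) (i : Int) (hi : 0 ≤ i) (acc : List Char) :
    (PySem.List.enumerate ps i).foldl
      (fun (acc : List Char) (ip : Int × List Char) =>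
        acc ++ (if PySem.Int.mod ip.1 2 = 0 then [':', 'm', 'a', 't', 'h', ':', '`'] else ['`']) ++ ip.2)
      acc =
    acc ++ renderTail ps (PySem.Int.mod i 2 = 1) := by
  induction ps generalizing i acc with
  | nil => simp [PySem.List.enumerate, renderTail]
  | cons p rest ih =>
    rw [PySem.List.enumerate_cons]
    simp only [List.foldl_cons]
    rw [ih (i + 1) (by omega)]
    have hm1 : PySem.Int.mod i 2 = i % 2 := PySem.Int.mod_eq_emod_of_pos (by norm_num)
    have hm2 : PySem.Int.mod (i + 1) 2 = (i + 1) % 2 := PySem.Int.mod_eq_emod_of_pos (by norm_num)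
    rw [hm1, hm2]
    simp only [renderTail]
    by_cases h2 : i % 2 = 0
    · have h3 : (i + 1) % 2 = 1 := by omega
      simp [h2, h3]
    · have h1 : i % 2 = 1 := by omega
      have h3 : ¬ (i + 1) % 2 = 1 := by omega
      simp [h1, h3]

-- ===== VERDICT (by name: the statement is the Claim_ definition above) =====
theorem math_highlight_spec : Claim_equal_math_highlight := by
  intro inline _
  unfold Spec_math_highlight math_highlight math_highlight_alt
  by_cases h : PySem.Chars.count inline.toList ['$'] < 2
  · simp [h]
  · simp only [h, if_false]
    rw [splitOn_eq_mysplit]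
    rw [show (fun (st : List Char × Bool) c =>
        if c = '$' then
          if st.2 then (st.1 ++ ['`'], false)
          else (st.1 ++ [':', 'm', 'a', 't', 'h', ':', '`'], true)
        else (st.1 ++ [c], st.2)) = stepA from rfl]
    rw [foldA_eq inline.toList [] false]
    rw [foldB_eq _ 0 (by norm_num)]
    cases hm : mysplit inline.toList with
    | nil => exact absurd hm (mysplit_ne_nil inline.toList)
    | cons hd t =>
      simp [PySem.Int.mod]
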